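-- pv_equiv track=rewrite | github.com/mihaMaks/2022SegmentationST | evaluation/evaluate.py | f1_ver4
-- ===== SOURCE A (Python) =====
-- def compare_len(real_segm, pred_segm):
--     real = set()
--     pred = set()
--     real_str = ""
--     pred_str = ""
--     c = 0
--     for s in real_segm.split('|'):
--         real.add((c, s))
--         real_str += s
--         c += len(s)
--     r_len = c
--
--     c = 0
--     for s in pred_segm.split('|'):
--         pred.add((c, s))
--         pred_str += s
--         c += len(s)
--     p_len = c
--
--     if r_len != p_len or real_str != pred_str:
--         return False
--     return True
--
-- def f1_ver4(real_segm, pred_segm):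
--     if not compare_len(real_segm, pred_segm):
--         return 0, 0, 0
--
--     true_positives = false_positives = false_negatives = 0
--     letter_pairs_r = set()
--     letter_pairs_p = set()
--     r = 1
--     for i, l in enumerate(real_segm):
--         if l == '|':
--             letter_pairs_r.add(i - r)
--             r += 1
--     p = 1
--     for i, l in enumerate(pred_segm):
--         if l == '|':
--             letter_pairs_p.add(i - p)
--             p += 1
--     true_positives = len(letter_pairs_p & letter_pairs_r)
--     false_positives = len(letter_pairs_p - letter_pairs_r)
--     false_negatives = len(letter_pairs_r - letter_pairs_p)
--
--     # word is monomorph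
--     if not letter_pairs_r:
--         true_positives = 0 if letter_pairs_p else 1
--         false_negatives = 1 if letter_pairs_p else 0
--     # word is predicted as monomprh
--     if not letter_pairs_p:
--         false_positives = 1 if letter_pairs_r else false_positives
--
--     return true_positives, false_positives, false_negatives
-- ===== SOURCE B (Python) =====
-- def _boundaries(segm):
--     # sorted, duplicate-free list of boundary letter-indices (index of letter before the '|', minus nothing: letters_seen - 1)
--     out = []
--     letters = 0
--     for ch in segm:
--         if ch == '|':
--             b = letters - 1
--             if not out or out[-1] != b:
--                 out.append(b)
--         else:
--             letters += 1
--     return out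
--
-- def f1_ver4(real_segm, pred_segm):
--     if ''.join(real_segm.split('|')) != ''.join(pred_segm.split('|')):
--         return 0, 0, 0
--     R = _boundaries(real_segm)
--     P = _boundaries(pred_segm)
--     tp = fp = fn = 0
--     i = j = 0
--     while i < len(R) and j < len(P):
--         if R[i] == P[j]:
--             tp += 1; i += 1; j += 1
--         elif R[i] < P[j]:
--             fn += 1; i += 1
--         else:
--             fp += 1; j += 1
--     fn += len(R) - i
--     fp += len(P) - j
--     if not R:
--         tp = 0 if P else 1
--         fn = 1 if P else 0
--     if not P:
--         fp = 1 if R else fp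
--     return tp, fp, fn
-- ===== Notes on version B (the rewrite author's own statement) =====
-- stated objective: alternative
-- what changed: B replaces A's unordered boundary sets and set-algebra counting (intersection/difference sizes) by sorted duplicate-free boundary lists built in one pass and a single two-pointer merge that counts TP/FP/FN, and replaces compare_len's set-building fold by a direct join-of-split string comparison.
import Mathlib
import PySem

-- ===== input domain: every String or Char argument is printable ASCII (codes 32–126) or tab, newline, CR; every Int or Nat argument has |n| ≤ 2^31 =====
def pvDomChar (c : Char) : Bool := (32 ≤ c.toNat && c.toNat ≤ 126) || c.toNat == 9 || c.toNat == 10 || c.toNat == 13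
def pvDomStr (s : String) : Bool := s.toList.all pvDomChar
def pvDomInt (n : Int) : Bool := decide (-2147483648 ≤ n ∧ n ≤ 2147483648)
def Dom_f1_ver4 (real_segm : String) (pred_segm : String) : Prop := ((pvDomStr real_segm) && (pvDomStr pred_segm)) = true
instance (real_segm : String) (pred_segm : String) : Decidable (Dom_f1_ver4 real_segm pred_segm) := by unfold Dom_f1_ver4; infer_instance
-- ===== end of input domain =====

-- B computes the same TP/FP/FN counts with sorted boundary lists and a two-pointer merge
-- instead of A's unordered sets and set intersection/difference; objective: alternative (same cost).

-- ===== PORT A =====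
-- loop body of compare_len's two identical for-loops (state: set of (c, s) pairs, accumulated string as List Char, running length c)
def pvCmpStep (acc : PySem.Set (Int × String) × List Char × Int) (s : String) :
    PySem.Set (Int × String) × List Char × Int :=
  (PySem.Set.add acc.1 (acc.2.2, s), acc.2.1 ++ s.toList, acc.2.2 + PySem.Str.len s)

def pvSegFold (segm : String) : PySem.Set (Int × String) × List Char × Int :=
  ((PySem.Str.split? segm "|").getD []).foldl pvCmpStep (PySem.Set.empty, [], 0)

def compare_len (real_segm : String) (pred_segm : String) : Bool :=
  let r := pvSegFold real_segm
  let p := pvSegFold pred_segm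
  if r.2.2 ≠ p.2.2 ∨ r.2.1 ≠ p.2.1 then false else true

-- loop body of A's boundary loops (state: letter_pairs set, counter r/p starting at 1)
def pvAStep (acc : PySem.Set Int × Int) (il : Int × Char) : PySem.Set Int × Int :=
  if il.2 = '|' then (PySem.Set.add acc.1 (il.1 - acc.2), acc.2 + 1) else acc

def pvPairsA (segm : String) : PySem.Set Int × Int :=
  (PySem.List.enumerate segm.toList).foldl pvAStep (PySem.Set.empty, 1)

def f1_ver4 (real_segm : String) (pred_segm : String) : Int × Int × Int :=
  if !(compare_len real_segm pred_segm) then (0, 0, 0)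
  else
    let lr := pvPairsA real_segm
    let lp := pvPairsA pred_segm
    let tp : Int := PySem.Set.len (PySem.Set.inter lp.1 lr.1)
    let fp : Int := PySem.Set.len (PySem.Set.diff lp.1 lr.1)
    let fn : Int := PySem.Set.len (PySem.Set.diff lr.1 lp.1)
    let tp := if lr.1 = [] then (if lp.1 = [] then (1 : Int) else 0) else tp
    let fn := if lr.1 = [] then (if lp.1 = [] then (0 : Int) else 1) else fn
    let fp := if lp.1 = [] then (if lr.1 = [] then fp else 1) else fp
    (tp, fp, fn)

-- ===== PORT B =====
-- loop body of _boundaries (state: ordered duplicate-free list of boundaries, letters seen)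
def pvBStep (acc : List Int × Int) (ch : Char) : List Int × Int :=
  if ch = '|' then
    let b := acc.2 - 1
    if acc.1.getLast? = some b then acc else (acc.1 ++ [b], acc.2)
  else (acc.1, acc.2 + 1)

def pvBoundaries (segm : String) : List Int :=
  (segm.toList.foldl pvBStep ([], 0)).1

-- the two-pointer while loop, as recursion on the two lists (fuel = total length, a pure totality device)
def pvMergeGo : Nat → List Int → List Int → Int × Int × Int
  | _, [], p => (0, (p.length : Int), 0)
  | _, a :: r, [] => (0, 0, ((a :: r).length : Int))
  | 0, _ :: _, _ :: _ => (0, 0, 0)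
  | fuel + 1, a :: r, b :: p =>
    if a = b then let t := pvMergeGo fuel r p; (t.1 + 1, t.2.1, t.2.2)
    else if a < b then let t := pvMergeGo fuel r (b :: p); (t.1, t.2.1, t.2.2 + 1)
    else let t := pvMergeGo fuel (a :: r) p; (t.1, t.2.1 + 1, t.2.2)

def pvMerge (R P : List Int) : Int × Int × Int := pvMergeGo (R.length + P.length) R P

def f1_ver4_alt (real_segm : String) (pred_segm : String) : Int × Int × Int :=
  if PySem.Str.join "" ((PySem.Str.split? real_segm "|").getD [])
      ≠ PySem.Str.join "" ((PySem.Str.split? pred_segm "|").getD []) then (0, 0, 0)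
  else
    let R := pvBoundaries real_segm
    let P := pvBoundaries pred_segm
    let t := pvMerge R P
    let tp := t.1
    let fp := t.2.1
    let fn := t.2.2
    let tp := if R = [] then (if P = [] then (1 : Int) else 0) else tp
    let fn := if R = [] then (if P = [] then (0 : Int) else 1) else fn
    let fp := if P = [] then (if R = [] then fp else 1) else fp
    (tp, fp, fn)

-- ===== PRECONDITION & SPEC =====
def Spec_f1_ver4 (real_segm : String) (pred_segm : String) (out : Int × Int × Int) : Prop := out = f1_ver4_alt real_segm pred_segm
instance (real_segm : String) (pred_segm : String) (out : Int × Int × Int) : Decidable (Spec_f1_ver4 real_segm pred_segm out) := by unfold Spec_f1_ver4; infer_instance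

-- ===== CLAIM (what is proved, stated in full; the proofs are below) =====
def Claim_equal_f1_ver4 : Prop := ∀ (real_segm : String) (pred_segm : String), Dom_f1_ver4 real_segm pred_segm → Spec_f1_ver4 real_segm pred_segm (f1_ver4 real_segm pred_segm)

-- ===== LEMMAS AND PROOFS =====

-- ''.join with empty separator is concatenation
theorem pvIntercalateNil (xs : List (List Char)) : List.intercalate ([] : List Char) xs = xs.flatten := by
  induction xs with
  | nil => simp [List.intercalate]
  | cons a xs ih => cases xs <;> simp_all [List.intercalate, List.intersperse]

-- in a strictly increasing list bounded by b, b is a member iff it is the last element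
theorem pvMemIffLast (L : List Int) (b : Int) (hp : L.Pairwise (· < ·)) (hb : ∀ x ∈ L, x ≤ b) :
    b ∈ L ↔ L.getLast? = some b := by
  induction L with
  | nil => simp
  | cons a L ih =>
    rcases List.pairwise_cons.mp hp with ⟨ha, hp'⟩
    cases L with
    | nil =>
      simp [eq_comm]
    | cons c L' =>
      have hab : b ≠ a := by
        have h1 := ha c (by simp)
        have h2 := hb c (by simp)
        omega
      rw [List.getLast?_cons_cons]
      have hiff := ih hp' (fun x hx => hb x (List.mem_cons_of_mem _ hx))
      simp only [List.mem_cons] at hiff ⊢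
      constructor
      · rintro (h | h | h)
        · exact absurd h hab
        · exact hiff.mp (Or.inl h)
        · exact hiff.mp (Or.inr h)
      · intro h
        rcases hiff.mpr h with h' | h'
        · exact Or.inr (Or.inl h')
        · exact Or.inr (Or.inr h')

-- the B boundary fold keeps its list strictly increasing and bounded by letters - 1
theorem pvBInv (cs : List Char) : ∀ (letters : Int) (L : List Int),
    L.Pairwise (· < ·) → (∀ x ∈ L, x ≤ letters - 1) →
    ((cs.foldl pvBStep (L, letters)).1.Pairwise (· < ·) ∧
      ∀ x ∈ (cs.foldl pvBStep (L, letters)).1, x ≤ (cs.foldl pvBStep (L, letters)).2 - 1) := by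
  induction cs with
  | nil => intro letters L hp hb; exact ⟨hp, hb⟩
  | cons c cs ih =>
    intro letters L hp hb
    simp only [List.foldl_cons]
    by_cases hc : c = '|'
    · simp only [pvBStep, hc, if_pos rfl]
      by_cases hl : L.getLast? = some (letters - 1)
      · simp only [hl, if_pos rfl]
        exact ih letters L hp hb
      · simp only [hl, if_neg hl]
        have hnm : (letters - 1) ∉ L := fun h => hl ((pvMemIffLast L (letters - 1) hp hb).mp h)
        refine ih letters (L ++ [letters - 1]) ?_ ?_
        · rw [List.pairwise_append]
          refine ⟨hp, by simp, ?_⟩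
          intro x hx y hy
          simp only [List.mem_singleton] at hy
          subst hy
          have := hb x hx
          have : x ≠ letters - 1 := fun h => hnm (h ▸ hx)
          omega
        · intro x hx
          rcases List.mem_append.mp hx with h | h
          · exact hb x h
          · simp only [List.mem_singleton] at h; omega
    · simp only [pvBStep, if_neg hc]
      refine ih (letters + 1) L hp ?_
      intro x hx
      have := hb x hx
      omega

-- A's enumerate/set loop computes B's list (plus its counter in closed form)
theorem pvLoopEq (cs : List Char) : ∀ (i0 letters : Int) (L : List Int),
    L.Pairwise (· < ·) → (∀ x ∈ L, x ≤ letters - 1) →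
    (PySem.List.enumerate cs i0).foldl pvAStep (L, i0 - letters + 1)
      = ((cs.foldl pvBStep (L, letters)).1,
         i0 + cs.length - (cs.foldl pvBStep (L, letters)).2 + 1) := by
  induction cs with
  | nil =>
    intro i0 letters L _ _
    simp [PySem.List.enumerate]
  | cons c cs ih =>
    intro i0 letters L hp hb
    rw [PySem.List.enumerate_cons]
    simp only [List.foldl_cons]
    by_cases hc : c = '|'
    · have hv : i0 - (i0 - letters + 1) = letters - 1 := by ring
      simp only [pvAStep, pvBStep, hc, hv]
      by_cases hl : L.getLast? = some (letters - 1)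
      · have hm : (letters - 1) ∈ L := (pvMemIffLast L (letters - 1) hp hb).mpr hl
        have hadd : PySem.Set.add L (letters - 1) = L := by
          simp [PySem.Set.add, PySem.Set.contains, List.contains_iff_mem, hm]
        simp only [hl, if_true, if_false, hadd, reduceIte]
        have h1 : i0 - letters + 1 + 1 = (i0 + 1) - letters + 1 := by ring
        rw [h1, ih (i0 + 1) letters L hp hb, Prod.mk.injEq]
        refine ⟨rfl, ?_⟩
        simp only [List.length_cons]
        push_cast
        ring
      · have hm : (letters - 1) ∉ L := fun h => hl ((pvMemIffLast L (letters - 1) hp hb).mp h)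
        have hadd : PySem.Set.add L (letters - 1) = L ++ [letters - 1] := by
          simp [PySem.Set.add, PySem.Set.contains, List.contains_iff_mem, hm]
        simp only [hl, if_true, if_false, hadd, reduceIte]
        have hp' : (L ++ [letters - 1]).Pairwise (· < ·) := by
          rw [List.pairwise_append]
          refine ⟨hp, by simp, ?_⟩
          intro x hx y hy
          simp only [List.mem_singleton] at hy
          subst hy
          have := hb x hx
          have : x ≠ letters - 1 := fun h => hm (h ▸ hx)
          omega
        have hb' : ∀ x ∈ L ++ [letters - 1], x ≤ letters - 1 := by
          intro x hx
          rcases List.mem_append.mp hx with h | h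
          · exact hb x h
          · simp only [List.mem_singleton] at h; omega
        have h1 : i0 - letters + 1 + 1 = (i0 + 1) - letters + 1 := by ring
        rw [h1, ih (i0 + 1) letters (L ++ [letters - 1]) hp' hb', Prod.mk.injEq]
        refine ⟨rfl, ?_⟩
        simp only [List.length_cons]
        push_cast
        ring_nf
    · simp only [pvAStep, pvBStep, if_neg hc]
      have hb' : ∀ x ∈ L, x ≤ (letters + 1) - 1 := by
        intro x hx
        have := hb x hx
        omega
      have h1 : i0 - letters + 1 = (i0 + 1) - (letters + 1) + 1 := by ring
      rw [h1, ih (i0 + 1) (letters + 1) L hp hb', Prod.mk.injEq]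
      refine ⟨rfl, ?_⟩
      simp only [List.length_cons]
      push_cast
      ring

-- the compare_len fold concatenates the pieces and keeps c equal to the length
theorem pvCmpFold (pieces : List String) : ∀ (S : PySem.Set (Int × String)) (cs : List Char),
    (pieces.foldl pvCmpStep (S, cs, (cs.length : Int))).2.1 = cs ++ (pieces.map String.toList).flatten
    ∧ (pieces.foldl pvCmpStep (S, cs, (cs.length : Int))).2.2
        = (((cs ++ (pieces.map String.toList).flatten).length : Nat) : Int) := by
  induction pieces with
  | nil => intro S cs; simp
  | cons s ps ih =>
    intro S cs
    simp only [List.foldl_cons, pvCmpStep]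
    have hlen : (cs.length : Int) + PySem.Str.len s = (((cs ++ s.toList).length : Nat) : Int) := by
      rw [PySem.Str.len_eq]
      simp
    rw [hlen]
    obtain ⟨h1, h2⟩ := ih (PySem.Set.add S ((cs.length : Int), s)) (cs ++ s.toList)
    constructor
    · rw [h1]; simp
    · rw [h2]; simp

-- compare_len answers exactly "the joined pieces coincide"
theorem pvGuardEq (r p : String) :
    compare_len r p = true ↔
      PySem.Str.join "" ((PySem.Str.split? r "|").getD [])
        = PySem.Str.join "" ((PySem.Str.split? p "|").getD []) := by
  have key : ∀ s : String,
      (pvSegFold s).2.1 = (((PySem.Str.split? s "|").getD []).map String.toList).flatten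
      ∧ (pvSegFold s).2.2
          = (((((PySem.Str.split? s "|").getD []).map String.toList).flatten.length : Nat) : Int) := by
    intro s
    have := pvCmpFold ((PySem.Str.split? s "|").getD []) PySem.Set.empty []
    simpa [pvSegFold] using this
  have jt : ∀ s : String,
      (PySem.Str.join "" ((PySem.Str.split? s "|").getD [])).toList
        = ((((PySem.Str.split? s "|").getD []).map String.toList)).flatten := by
    intro s
    rw [PySem.Str.toList_join]
    simp [PySem.Chars.join, pvIntercalateNil]
  show (if (pvSegFold r).2.2 ≠ (pvSegFold p).2.2 ∨ (pvSegFold r).2.1 ≠ (pvSegFold p).2.1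
      then false else true) = true ↔ _
  split_ifs with h
  · simp only [Bool.false_eq_true, false_iff]
    intro hJ
    rw [← String.toList_inj, jt r, jt p] at hJ
    have hl : (pvSegFold r).2.1 = (pvSegFold p).2.1 := by
      rw [(key r).1, (key p).1, hJ]
    have hc : (pvSegFold r).2.2 = (pvSegFold p).2.2 := by
      rw [(key r).2, (key p).2, hJ]
    rcases h with h | h
    · exact h hc
    · exact h hl
  · simp only [true_iff]
    push_neg at h
    rw [← String.toList_inj, jt r, jt p, ← (key r).1, ← (key p).1]
    exact h.2

-- the two-pointer merge counts intersections and differences of strictly increasing lists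
theorem pvMergeSpec : ∀ (fuel : Nat) (R P : List Int), R.length + P.length ≤ fuel →
    R.Pairwise (· < ·) → P.Pairwise (· < ·) →
    pvMergeGo fuel R P = (((P.filter (fun x => R.contains x)).length : Int),
                          ((P.filter (fun x => !R.contains x)).length : Int),
                          ((R.filter (fun x => !P.contains x)).length : Int)) := by
  intro fuel
  induction fuel with
  | zero =>
    intro R P h _ _
    cases R with
    | nil =>
      cases P with
      | nil => simp [pvMergeGo]
      | cons b p => simp [pvMergeGo]
    | cons a r =>
      cases P with
      | nil => simp [pvMergeGo]
      | cons b p => simp at h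
  | succ fuel ih =>
    intro R P h hR hP
    cases R with
    | nil =>
      cases P with
      | nil => simp [pvMergeGo]
      | cons b p => simp [pvMergeGo]
    | cons a r =>
      cases P with
      | nil => simp [pvMergeGo]
      | cons b p =>
        rcases List.pairwise_cons.mp hR with ⟨har, hr⟩
        rcases List.pairwise_cons.mp hP with ⟨hbp, hp⟩
        simp only [List.length_cons] at h
        by_cases hab : a = b
        · subst hab
          simp only [pvMergeGo, if_pos rfl]
          rw [ih r p (by omega) hr hp]
          have f1 : (a :: p).filter (fun x => (a :: r).contains x)
              = a :: p.filter (fun x => r.contains x) := by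
            rw [List.filter_cons]
            simp only [List.contains_cons, BEq.rfl, Bool.true_or, if_true, reduceIte]
            congr 1
            apply List.filter_congr
            intro x hx
            have hax : a < x := hbp x hx
            have hxa : ¬ (x = a) := by omega
            simp [List.contains_cons, hxa]
          have f2 : (a :: p).filter (fun x => !(a :: r).contains x)
              = p.filter (fun x => !r.contains x) := by
            rw [List.filter_cons]
            simp only [List.contains_cons, BEq.rfl, Bool.true_or, Bool.not_true, if_false, reduceIte]
            apply List.filter_congr
            intro x hx
            have hax : a < x := hbp x hx
            have hxa : ¬ (x = a) := by omega
            simp [List.contains_cons, hxa]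
          have f3 : (a :: r).filter (fun x => !(a :: p).contains x)
              = r.filter (fun x => !p.contains x) := by
            rw [List.filter_cons]
            simp only [List.contains_cons, BEq.rfl, Bool.true_or, Bool.not_true, if_false, reduceIte]
            apply List.filter_congr
            intro x hx
            have hax : a < x := har x hx
            have hxa : ¬ (x = a) := by omega
            simp [List.contains_cons, hxa]
          rw [f1, f2, f3, Prod.mk.injEq, Prod.mk.injEq]
          refine ⟨?_, rfl, rfl⟩
          simp only [List.length_cons]
          push_cast
          ring
        · by_cases hlt : a < b
          · simp only [pvMergeGo, if_neg hab, if_pos hlt]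
            rw [ih r (b :: p) (by simp only [List.length_cons]; omega) hr hP]
            have hall : ∀ x ∈ b :: p, a < x := by
              intro x hx
              rcases List.mem_cons.mp hx with h' | h'
              · omega
              · have := hbp x h'; omega
            have f1 : (b :: p).filter (fun x => (a :: r).contains x)
                = (b :: p).filter (fun x => r.contains x) := by
              apply List.filter_congr
              intro x hx
              have := hall x hx
              have hxa : ¬ (x = a) := by omega
              simp [List.contains_cons, hxa]
            have f2 : (b :: p).filter (fun x => !(a :: r).contains x)
                = (b :: p).filter (fun x => !r.contains x) := by
              apply List.filter_congr
              intro x hx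
              have := hall x hx
              have hxa : ¬ (x = a) := by omega
              simp [List.contains_cons, hxa]
            have f3 : (a :: r).filter (fun x => !(b :: p).contains x)
                = a :: r.filter (fun x => !(b :: p).contains x) := by
              rw [List.filter_cons]
              have : ¬ a ∈ b :: p := fun hmem => absurd (hall a hmem) (lt_irrefl a)
              simp [List.contains_iff_mem, this]
            rw [f1, f2, f3, Prod.mk.injEq, Prod.mk.injEq]
            refine ⟨rfl, rfl, ?_⟩
            simp only [List.length_cons]
            push_cast
            ring
          · have hgt : b < a := by omega
            simp only [pvMergeGo, if_neg hab, if_neg hlt]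
            rw [ih (a :: r) p (by simp only [List.length_cons]; omega) hR hp]
            have hall : ∀ x ∈ a :: r, b < x := by
              intro x hx
              rcases List.mem_cons.mp hx with h' | h'
              · omega
              · have := har x h'; omega
            have f1 : (b :: p).filter (fun x => (a :: r).contains x)
                = p.filter (fun x => (a :: r).contains x) := by
              rw [List.filter_cons]
              have : ¬ b ∈ a :: r := fun hmem => absurd (hall b hmem) (lt_irrefl b)
              simp [List.contains_iff_mem, this]
            have f2 : (b :: p).filter (fun x => !(a :: r).contains x)
                = b :: p.filter (fun x => !(a :: r).contains x) := by
              rw [List.filter_cons]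
              have : ¬ b ∈ a :: r := fun hmem => absurd (hall b hmem) (lt_irrefl b)
              simp [List.contains_iff_mem, this]
            have f3 : (a :: r).filter (fun x => !(b :: p).contains x)
                = (a :: r).filter (fun x => !p.contains x) := by
              apply List.filter_congr
              intro x hx
              have := hall x hx
              have hxb : ¬ (x = b) := by omega
              simp [List.contains_cons, hxb]
            rw [f1, f2, f3, Prod.mk.injEq, Prod.mk.injEq]
            refine ⟨rfl, ?_, rfl⟩
            simp only [List.length_cons]
            push_cast
            ring

-- A's set loop result seen as B's boundary list
theorem pvPairsEq (s : String) : (pvPairsA s).1 = pvBoundaries s := by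
  have h := pvLoopEq s.toList 0 0 [] (by simp) (by simp)
  have h01 : (0 : Int) - 0 + 1 = 1 := by norm_num
  rw [h01] at h
  show (List.foldl pvAStep (([] : List Int), (1 : Int)) (PySem.List.enumerate s.toList 0)).1
      = pvBoundaries s
  rw [h]
  rfl

theorem pvBoundariesSorted (s : String) : (pvBoundaries s).Pairwise (· < ·) := by
  have h := pvBInv s.toList 0 [] (by simp) (by simp)
  exact h.1

-- ===== VERDICT (by name: the statement is the Claim_ definition above) =====
theorem f1_ver4_spec : Claim_equal_f1_ver4 := by
  intro r p _
  unfold Spec_f1_ver4 f1_ver4 f1_ver4_alt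
  by_cases hJ : PySem.Str.join "" ((PySem.Str.split? r "|").getD [])
      = PySem.Str.join "" ((PySem.Str.split? p "|").getD [])
  · have hc : compare_len r p = true := (pvGuardEq r p).mpr hJ
    simp only [hc, Bool.not_true, Bool.false_eq_true, if_false, ne_eq, hJ, not_true_eq_false,
      reduceIte]
    have hm := pvMergeSpec ((pvBoundaries r).length + (pvBoundaries p).length)
      (pvBoundaries r) (pvBoundaries p) (le_refl _) (pvBoundariesSorted r) (pvBoundariesSorted p)
    simp only [pvPairsEq, pvMerge, hm, PySem.Set.len, PySem.Set.inter, PySem.Set.diff,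
      PySem.Set.contains]
  · have hc : compare_len r p = false := by
      cases hcv : compare_len r p
      · rfl
      · exact absurd ((pvGuardEq r p).mp hcv) hJ
    simp only [hc, Bool.not_false, if_true, ne_eq, hJ, not_false_eq_true, reduceIte]
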